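-- pv_equiv track=rewrite | github.com/kostyanya513/my-works | lessons python/Module19/03_goods/main.py | funkciya
-- ===== SOURCE A (Python) =====
-- import math
--
-- def all_costs(product):
--     cost_goods = dict()
--     for y in product:
--         cost_goods['prod'] = product[y]
--         break
--     cost_goods['summa_za_vd'] = math.prod(dict.values(product))
--     return cost_goods
--
-- def funkciya(string):
--     tovar = dict()
--     product_in_stock = []
--     products_stock = []
--     for i in string:
--         all_costs(i)
--         product_in_stock.append(all_costs(i))
--     for d in product_in_stock:
--         for k in d.keys():
--             tovar[k] = tovar.get(k, 0) + d[k]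
--     products_stock.append(tovar)
--     return products_stock
-- ===== SOURCE B (Python) =====
-- import math
--
-- def funkciya(string):
--     tovar = {}
--     for i in string:
--         for v in i.values():
--             tovar['prod'] = tovar.get('prod', 0) + v
--             break
--         tovar['summa_za_vd'] = tovar.get('summa_za_vd', 0) + math.prod(i.values())
--     return [tovar]
-- ===== Notes on version B (the rewrite author's own statement) =====
-- stated objective: simpler
-- what changed: Single fused pass that updates the accumulator dict directly per input dict, eliminating the all_costs helper and the intermediate product_in_stock list (and A's duplicated all_costs call).
import Mathlib
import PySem

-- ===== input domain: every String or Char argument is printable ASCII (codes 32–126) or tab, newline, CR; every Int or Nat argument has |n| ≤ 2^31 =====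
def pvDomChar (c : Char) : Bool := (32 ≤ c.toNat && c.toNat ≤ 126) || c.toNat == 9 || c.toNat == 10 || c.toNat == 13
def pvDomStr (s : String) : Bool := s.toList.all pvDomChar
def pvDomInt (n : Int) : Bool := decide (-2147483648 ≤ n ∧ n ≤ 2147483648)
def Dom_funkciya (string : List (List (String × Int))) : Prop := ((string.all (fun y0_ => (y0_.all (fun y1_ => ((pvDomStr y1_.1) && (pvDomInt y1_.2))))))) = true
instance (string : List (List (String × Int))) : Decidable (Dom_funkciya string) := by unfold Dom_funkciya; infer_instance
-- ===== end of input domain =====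

-- B fuses A's two passes into one loop over the input, updating the accumulator
-- dict directly; no helper and no intermediate list.  Objective: simpler.

-- ===== PORT A =====
-- inner dicts arrive as Python dicts: interpret each assoc list via PySem.Dict.ofList
def all_costs (product : PySem.Dict String Int) : PySem.Dict String Int :=
  -- 'for y in product: cost_goods["prod"] = product[y]; break'
  let cost_goods : PySem.Dict String Int :=
    match product.keys with
    | [] => PySem.Dict.empty
    | y :: _ => PySem.Dict.empty.insert "prod" (product.getD y 0)
      -- y ∈ product.keys, so the default 0 is never the value used
  -- cost_goods['summa_za_vd'] = math.prod(dict.values(product))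
  cost_goods.insert "summa_za_vd" (product.values.foldl (· * ·) 1)

def funkciya (string : List (List (String × Int))) : List (List (String × Int)) :=
  let tovar : PySem.Dict String Int := PySem.Dict.empty
  let product_in_stock : List (PySem.Dict String Int) :=
    string.map (fun i => all_costs (PySem.Dict.ofList i))   -- all_costs is pure, so A's discarded first call is omitted
  let tovar := product_in_stock.foldl
    (fun t d => d.keys.foldl (fun t k => t.insert k (t.getD k 0 + d.getD k 0)) t) tovar
  [tovar.items]

-- ===== PORT B =====
def funkciya_alt (string : List (List (String × Int))) : List (List (String × Int)) :=
  let tovar := string.foldl (fun t i =>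
    let d := PySem.Dict.ofList i
    -- 'for v in i.values(): tovar["prod"] = tovar.get("prod",0)+v; break'
    let t := match d.values with
      | [] => t
      | v :: _ => t.insert "prod" (t.getD "prod" 0 + v)
    t.insert "summa_za_vd" (t.getD "summa_za_vd" 0 + d.values.foldl (· * ·) 1))
    PySem.Dict.empty
  [tovar.items]

-- ===== PRECONDITION & SPEC =====
def Spec_funkciya (string : List (List (String × Int))) (out : List (List (String × Int))) : Prop := out = funkciya_alt string
instance (string : List (List (String × Int))) (out : List (List (String × Int))) : Decidable (Spec_funkciya string out) := by unfold Spec_funkciya; infer_instance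

-- ===== CLAIM (what is proved, stated in full; the proofs are below) =====
def Claim_equal_funkciya : Prop := ∀ (string : List (List (String × Int))), Dom_funkciya string → Spec_funkciya string (funkciya string)

-- ===== LEMMAS AND PROOFS =====

-- the per-element steps of A's aggregation loop and of B's fused loop agree
theorem step_eq (t : PySem.Dict String Int) (i : List (String × Int)) :
    (fun t d => (PySem.Dict.keys d).foldl (fun t k => t.insert k (t.getD k 0 + d.getD k 0)) t) t
      (all_costs (PySem.Dict.ofList i))
    = (let d := PySem.Dict.ofList i
       let t := match d.values with
         | [] => t
         | v :: _ => t.insert "prod" (t.getD "prod" 0 + v)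
       t.insert "summa_za_vd" (t.getD "summa_za_vd" 0 + d.values.foldl (· * ·) 1)) := by
  have hnd : (PySem.Dict.ofList i).keys.Nodup := PySem.Dict.nodup_keys_ofList i
  rcases h : (PySem.Dict.ofList i).items with _ | ⟨⟨y, v⟩, rest⟩
  · simp only [all_costs, PySem.Dict.keys, PySem.Dict.values, h, List.map_nil]
    simp [PySem.Dict.items_insert, PySem.Dict.getD_insert,
      PySem.Dict.contains_empty, show (PySem.Dict.empty : PySem.Dict String Int).items = [] from rfl]
  · have hmem : ((y, v) : String × Int) ∈ (PySem.Dict.ofList i).items := by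
      rw [h]; exact List.mem_cons_self ..
    have hyv : (PySem.Dict.ofList i).getD y 0 = v :=
      PySem.Dict.getD_of_mem_items _ hmem hnd 0
    simp only [all_costs, PySem.Dict.keys, PySem.Dict.values, h, List.map_cons]
    simp [PySem.Dict.items_insert, PySem.Dict.getD_insert, PySem.Dict.contains_insert,
      PySem.Dict.contains_empty, hyv,
      show (PySem.Dict.empty : PySem.Dict String Int).items = [] from rfl]

theorem funkciya_spec' (string : List (List (String × Int))) :
    funkciya string = funkciya_alt string := by
  unfold funkciya funkciya_alt
  simp only [List.foldl_map]
  have h : (fun (t : PySem.Dict String Int) (i : List (String × Int)) =>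
      (all_costs (PySem.Dict.ofList i)).keys.foldl
        (fun t k => t.insert k (t.getD k 0 + (all_costs (PySem.Dict.ofList i)).getD k 0)) t)
    = (fun (t : PySem.Dict String Int) (i : List (String × Int)) =>
       (let d := PySem.Dict.ofList i
        let t := match d.values with
          | [] => t
          | v :: _ => t.insert "prod" (t.getD "prod" 0 + v)
        t.insert "summa_za_vd" (t.getD "summa_za_vd" 0 + d.values.foldl (· * ·) 1))) :=
    funext fun t => funext fun i => step_eq t i
  rw [h]

-- ===== VERDICT (by name: the statement is the Claim_ definition above) =====
theorem funkciya_spec : Claim_equal_funkciya := by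
  intro s _; unfold Spec_funkciya; exact funkciya_spec' s
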